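-- pv_equiv track=rewrite | github.com/Homicidal-Duck/MP_Generative_Lang_Models_For_Hansard | model.py | dict3D_from_dict
-- ===== SOURCE A (Python) =====
-- def dict3D_from_dict(trigram_counts):
--     trigram_3D_dict = {}
--     trigrams_sorted = sorted(trigram_counts, key=trigram_counts.get, reverse=True)
--     for trigram in trigrams_sorted:
--         trigram_3D_dict.update({trigram[0]: dict()})
--
--     for trigram in trigrams_sorted:
--         trigram_3D_dict.get(trigram[0]).update({trigram[1]: dict()})
--
--     for trigram in trigrams_sorted:
--         count = trigram_counts.get(trigram)
--         # first_dict = trigram_3D_dict.get(trigram[0])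
--         # second_dict = first_dict.get(trigram[1])
--         # second_dict.update({trigram[2]: count})
--         trigram_3D_dict.get(trigram[0]).get(trigram[1]).update({trigram[2]: count})
--
--     return trigram_3D_dict
-- ===== SOURCE B (Python) =====
-- def dict3D_from_dict(trigram_counts):
--     trigram_3D_dict = {}
--     for t in sorted(trigram_counts, key=trigram_counts.get, reverse=True):
--         trigram_3D_dict.setdefault(t[0], {}).setdefault(t[1], {})[t[2]] = trigram_counts[t]
--     return trigram_3D_dict
-- ===== Notes on version B (the rewrite author's own statement) =====
-- stated objective: simpler
-- what changed: A builds the nested dict in three separate passes over the sorted trigrams (one per nesting level, resetting inner dicts to {} and refilling them); B builds all three levels in a single pass with setdefault, which preserves the same first-appearance key insertion order at every level.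
import Mathlib
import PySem

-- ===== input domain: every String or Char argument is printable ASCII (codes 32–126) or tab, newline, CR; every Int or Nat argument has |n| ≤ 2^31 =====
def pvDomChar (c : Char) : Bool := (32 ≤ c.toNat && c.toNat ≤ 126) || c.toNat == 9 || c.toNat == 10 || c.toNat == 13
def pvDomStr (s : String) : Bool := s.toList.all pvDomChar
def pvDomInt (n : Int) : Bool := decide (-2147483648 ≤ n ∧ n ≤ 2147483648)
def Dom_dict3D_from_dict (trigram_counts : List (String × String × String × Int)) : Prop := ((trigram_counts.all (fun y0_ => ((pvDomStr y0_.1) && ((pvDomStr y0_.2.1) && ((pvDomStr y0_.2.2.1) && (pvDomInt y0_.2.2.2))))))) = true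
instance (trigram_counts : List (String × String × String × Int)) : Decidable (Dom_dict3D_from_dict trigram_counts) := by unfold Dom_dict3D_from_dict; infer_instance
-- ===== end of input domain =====

-- B fuses A's three passes over the sorted trigrams into a single setdefault pass (same output; objective: simpler).

-- ===== PORT A =====
-- The Python argument is a dict keyed by (w1, w2, w3) triples; its List encoding is
-- rebuilt into that dict here (last value wins, first-insertion key order — exactly dict(pairs)).
def pvTriDict (trigram_counts : List (String × String × String × Int)) :
    PySem.Dict (String × String × String) Int :=
  PySem.Dict.ofList (trigram_counts.map (fun e => ((e.1, e.2.1, e.2.2.1), e.2.2.2)))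

-- trigram_counts.get(t) / trigram_counts[t]; every t it is applied to is a key of the dict,
-- so Python's .get never yields None here and the default 0 is never used.
def pvCount (trigram_counts : List (String × String × String × Int))
    (t : String × String × String) : Int :=
  (pvTriDict trigram_counts).getD t 0

-- sorted(trigram_counts, key=trigram_counts.get, reverse=True)  (iterating a dict yields its keys)
def pvTrigramsSorted (trigram_counts : List (String × String × String × Int)) :
    List (String × String × String) :=
  PySem.List.sorted (pvTriDict trigram_counts).keys (fun t => pvCount trigram_counts t) true

-- the nested dict, flattened back to the List return encoding
def pvFlatten (d : PySem.Dict String (PySem.Dict String (PySem.Dict String Int))) :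
    List (String × List (String × List (String × Int))) :=
  d.items.map (fun p => (p.1, p.2.items.map (fun q => (q.1, q.2.items))))

-- Three passes over the sorted trigrams, exactly as A.  In passes 2 and 3 Python mutates
-- the inner dict obtained by .get(trigram[0]) (resp. .get(...).get(trigram[1])) in place;
-- that key is always present (pass 1/2 put it there), and Dict.modify at a present key is
-- exactly that in-place update.
def dict3D_from_dict (trigram_counts : List (String × String × String × Int)) :
    List (String × List (String × List (String × Int))) :=
  let ts := pvTrigramsSorted trigram_counts
  let d1 := ts.foldl (fun d t => d.insert t.1 PySem.Dict.empty)
    (PySem.Dict.empty : PySem.Dict String (PySem.Dict String (PySem.Dict String Int)))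
  let d2 := ts.foldl (fun d t =>
    d.modify t.1 PySem.Dict.empty (fun i => i.insert t.2.1 PySem.Dict.empty)) d1
  let d3 := ts.foldl (fun d t =>
    d.modify t.1 PySem.Dict.empty (fun i =>
      i.modify t.2.1 PySem.Dict.empty (fun j => j.insert t.2.2 (pvCount trigram_counts t)))) d2
  pvFlatten d3

-- ===== PORT B =====
-- One pass: trigram_3D_dict.setdefault(t[0], {}).setdefault(t[1], {})[t[2]] = trigram_counts[t].
-- The dict returned by each setdefault is mutated in place, i.e. modify at that (now present) key.
def dict3D_from_dict_alt (trigram_counts : List (String × String × String × Int)) :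
    List (String × List (String × List (String × Int))) :=
  pvFlatten ((pvTrigramsSorted trigram_counts).foldl (fun d t =>
    (d.setdefault t.1 PySem.Dict.empty).modify t.1 PySem.Dict.empty (fun i =>
      (i.setdefault t.2.1 PySem.Dict.empty).modify t.2.1 PySem.Dict.empty (fun j =>
        j.insert t.2.2 (pvCount trigram_counts t))))
    (PySem.Dict.empty : PySem.Dict String (PySem.Dict String (PySem.Dict String Int))))

-- ===== PRECONDITION & SPEC =====
def Spec_dict3D_from_dict (trigram_counts : List (String × String × String × Int)) (out : List (String × List (String × List (String × Int)))) : Prop := out = dict3D_from_dict_alt trigram_counts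
instance (trigram_counts : List (String × String × String × Int)) (out : List (String × List (String × List (String × Int)))) : Decidable (Spec_dict3D_from_dict trigram_counts out) := by unfold Spec_dict3D_from_dict; infer_instance

-- ===== CLAIM (what is proved, stated in full; the proofs are below) =====
def Claim_equal_dict3D_from_dict : Prop := ∀ (trigram_counts : List (String × String × String × Int)), Dom_dict3D_from_dict trigram_counts → Spec_dict3D_from_dict trigram_counts (dict3D_from_dict trigram_counts)

-- ===== LEMMAS AND PROOFS =====

-- Canonical description of the intermediate dicts as a function of the processed prefix p:
-- pvW p / pvW2 p w are the first/second-level key lists, pvInner the innermost dict.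

def pvW (p : List (String × String × String)) : List String :=
  PySem.Set.ofList (p.map (·.1))

def pvW2 (p : List (String × String × String)) (w : String) : List String :=
  PySem.Set.ofList ((p.filter (fun t => t.1 == w)).map (·.2.1))

def pvInner (cnt : (String × String × String) → Int)
    (p : List (String × String × String)) (w w2 : String) : PySem.Dict String Int :=
  (p.filter (fun t => t.1 == w && t.2.1 == w2)).foldl
    (fun j t => j.insert t.2.2 (cnt t)) PySem.Dict.empty

def pvC1 (p : List (String × String × String)) :
    PySem.Dict String (PySem.Dict String (PySem.Dict String Int)) :=
  ⟨(pvW p).map (fun w => (w, PySem.Dict.empty))⟩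

def pvC2 (ks : List String) (p : List (String × String × String)) :
    PySem.Dict String (PySem.Dict String (PySem.Dict String Int)) :=
  ⟨ks.map (fun w => (w, ⟨(pvW2 p w).map (fun w2 => (w2, PySem.Dict.empty))⟩))⟩

def pvC3 (cnt : (String × String × String) → Int) (ks : List String)
    (ks2 : String → List String) (p : List (String × String × String)) :
    PySem.Dict String (PySem.Dict String (PySem.Dict String Int)) :=
  ⟨ks.map (fun w => (w, ⟨(ks2 w).map (fun w2 => (w2, pvInner cnt p w w2))⟩))⟩

-- generic facts about a dict whose items are a map over a key list
theorem pv_contains_map {ν : Type} (W : List String) (F : String → ν) (k : String) :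
    (PySem.Dict.mk (W.map (fun w => (w, F w)))).contains k = decide (k ∈ W) := by
  simp [PySem.Dict.contains_mk, List.any_map, Function.comp_def]
  by_cases h : k ∈ W
  · simp only [h, decide_true, List.any_eq_true]
    exact ⟨k, h, by simp⟩
  · simp only [h, decide_false, List.any_eq_false]
    intro x hx
    simp only [beq_iff_eq]
    rintro rfl
    exact h hx

theorem pv_insert_mem {ν : Type} (W : List String) (F : String → ν) (k : String) (v : ν)
    (hk : k ∈ W) :
    (PySem.Dict.mk (W.map (fun w => (w, F w)))).insert k v
      = PySem.Dict.mk (W.map (fun w => (w, if w = k then v else F w))) := by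
  apply PySem.Dict.ext
  rw [PySem.Dict.items_insert, if_pos (by rw [pv_contains_map]; simpa using hk)]
  simp only [List.map_map]
  apply List.map_congr_left
  intro w _
  by_cases hw : w = k <;> simp [hw]

theorem pv_insert_not_mem {ν : Type} (W : List String) (F : String → ν) (k : String) (v : ν)
    (hk : k ∉ W) :
    (PySem.Dict.mk (W.map (fun w => (w, F w)))).insert k v
      = PySem.Dict.mk (W.map (fun w => (w, F w)) ++ [(k, v)]) := by
  apply PySem.Dict.ext
  rw [PySem.Dict.items_insert, if_neg (by rw [pv_contains_map]; simpa using hk)]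

theorem pv_getD_mem {ν : Type} (W : List String) (F : String → ν) (k : String) (d0 : ν)
    (hnd : W.Nodup) (hk : k ∈ W) :
    (PySem.Dict.mk (W.map (fun w => (w, F w)))).getD k d0 = F k := by
  apply PySem.Dict.getD_of_mem_items
  · exact List.mem_map.2 ⟨k, hk, rfl⟩
  · simpa [PySem.Dict.keys, List.map_map, Function.comp_def] using hnd

theorem pv_setdefault_mem {ν : Type} (W : List String) (F : String → ν) (k : String) (v : ν)
    (hk : k ∈ W) :
    (PySem.Dict.mk (W.map (fun w => (w, F w)))).setdefault k v
      = PySem.Dict.mk (W.map (fun w => (w, F w))) := by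
  simp [PySem.Dict.setdefault, hk]

theorem pv_setdefault_not_mem {ν : Type} (W : List String) (F : String → ν) (k : String) (v : ν)
    (hk : k ∉ W) :
    (PySem.Dict.mk (W.map (fun w => (w, F w)))).setdefault k v
      = PySem.Dict.mk (W.map (fun w => (w, F w)) ++ [(k, v)]) := by
  simp [PySem.Dict.setdefault, hk]

-- evolution of the canonical key lists when one trigram is appended
theorem pvW_append (p : List (String × String × String)) (t : String × String × String) :
    pvW (p ++ [t]) = PySem.Set.add (pvW p) t.1 := by
  simp [pvW, PySem.Set.ofList_append_singleton]

theorem pvW_nodup (p : List (String × String × String)) : (pvW p).Nodup :=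
  PySem.Set.nodup_ofList _

theorem pvW2_nodup (p : List (String × String × String)) (w : String) : (pvW2 p w).Nodup :=
  PySem.Set.nodup_ofList _

theorem pvW2_append_self (p : List (String × String × String)) (t : String × String × String) :
    pvW2 (p ++ [t]) t.1 = PySem.Set.add (pvW2 p t.1) t.2.1 := by
  simp [pvW2, List.filter_append, PySem.Set.ofList_append_singleton]

theorem pvW2_append_ne (p : List (String × String × String)) (t : String × String × String)
    (w : String) (hw : w ≠ t.1) : pvW2 (p ++ [t]) w = pvW2 p w := by
  have : (t.1 == w) = false := beq_eq_false_iff_ne.2 (Ne.symm hw)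
  simp [pvW2, List.filter_append, this]

theorem pvInner_append_self (cnt : (String × String × String) → Int)
    (p : List (String × String × String)) (t : String × String × String) :
    pvInner cnt (p ++ [t]) t.1 t.2.1 = (pvInner cnt p t.1 t.2.1).insert t.2.2 (cnt t) := by
  simp [pvInner, List.filter_append, List.foldl_append]

theorem pvInner_append_ne (cnt : (String × String × String) → Int)
    (p : List (String × String × String)) (t : String × String × String)
    (w w2 : String) (h : ¬(w = t.1 ∧ w2 = t.2.1)) :
    pvInner cnt (p ++ [t]) w w2 = pvInner cnt p w w2 := by
  have : (t.1 == w && t.2.1 == w2) = false := by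
    rcases not_and_or.1 h with h1 | h2
    · simp [beq_eq_false_iff_ne.2 (Ne.symm h1)]
    · simp [beq_eq_false_iff_ne.2 (Ne.symm h2)]
  simp [pvInner, List.filter_append, this]

-- membership of each trigram's components in the full key lists
theorem pv_mem_W (ts : List (String × String × String)) (t : String × String × String)
    (ht : t ∈ ts) : t.1 ∈ pvW ts := by
  simp only [pvW, PySem.Set.mem_ofList, List.mem_map]
  exact ⟨t, ht, rfl⟩

theorem pv_mem_W2 (ts : List (String × String × String)) (t : String × String × String)
    (ht : t ∈ ts) : t.2.1 ∈ pvW2 ts t.1 := by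
  simp only [pvW2, PySem.Set.mem_ofList, List.mem_map]
  exact ⟨t, List.mem_filter.2 ⟨ht, by simp⟩, rfl⟩

-- the second-level key list and innermost dicts of a first word not yet seen are empty
theorem pvW2_of_not_mem (p : List (String × String × String)) (w : String)
    (hw : w ∉ pvW p) : pvW2 p w = [] := by
  have : p.filter (fun t => t.1 == w) = [] := by
    rw [List.filter_eq_nil_iff]
    intro t ht
    simp only [beq_iff_eq]
    rintro rfl
    exact hw (pv_mem_W p t ht)
  simp [pvW2, this]

theorem pvInner_of_not_mem (cnt : (String × String × String) → Int)
    (p : List (String × String × String)) (w w2 : String)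
    (hw : w2 ∉ pvW2 p w) : pvInner cnt p w w2 = PySem.Dict.empty := by
  have : p.filter (fun t => t.1 == w && t.2.1 == w2) = [] := by
    rw [List.filter_eq_nil_iff]
    intro t ht
    simp only [Bool.and_eq_true, beq_iff_eq, not_and]
    intro h1 h2
    subst h1; subst h2
    exact absurd (pv_mem_W2 p t ht) hw
  simp [pvInner, this]

-- pass 1 step and fold
theorem pv_step1 (p : List (String × String × String)) (t : String × String × String) :
    (pvC1 p).insert t.1 PySem.Dict.empty = pvC1 (p ++ [t]) := by
  unfold pvC1
  rw [pvW_append]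
  by_cases h : t.1 ∈ pvW p
  · rw [pv_insert_mem _ _ _ _ h, PySem.Set.add_of_mem h]
    simp
  · rw [pv_insert_not_mem _ _ _ _ h, PySem.Set.add_of_not_mem h]
    simp

theorem pv_fold1 (rest p : List (String × String × String)) :
    rest.foldl (fun d t => d.insert t.1 PySem.Dict.empty) (pvC1 p) = pvC1 (p ++ rest) := by
  induction rest generalizing p with
  | nil => simp
  | cons t rest ih => simpa [pv_step1] using ih (p ++ [t])

-- pass 2 step and fold
theorem pv_step2 (ks : List String) (p : List (String × String × String))
    (t : String × String × String) (hnd : ks.Nodup) (ht : t.1 ∈ ks) :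
    (pvC2 ks p).modify t.1 PySem.Dict.empty (fun i => i.insert t.2.1 PySem.Dict.empty)
      = pvC2 ks (p ++ [t]) := by
  unfold pvC2
  rw [PySem.Dict.modify, pv_getD_mem _ _ _ _ hnd ht, pv_insert_mem _ _ _ _ ht]
  congr 1
  apply List.map_congr_left
  intro w _
  by_cases hw : w = t.1
  · subst hw
    rw [if_pos rfl, pvW2_append_self]
    by_cases h2 : t.2.1 ∈ pvW2 p t.1
    · rw [pv_insert_mem _ _ _ _ h2, PySem.Set.add_of_mem h2]
      simp
    · rw [pv_insert_not_mem _ _ _ _ h2, PySem.Set.add_of_not_mem h2]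
      simp
  · simp [hw, pvW2_append_ne p t w hw]

theorem pv_fold2 (ks : List String) (rest p : List (String × String × String))
    (hnd : ks.Nodup) (h : ∀ t ∈ rest, t.1 ∈ ks) :
    rest.foldl (fun d t =>
        d.modify t.1 PySem.Dict.empty (fun i => i.insert t.2.1 PySem.Dict.empty)) (pvC2 ks p)
      = pvC2 ks (p ++ rest) := by
  induction rest generalizing p with
  | nil => simp
  | cons t rest ih =>
      have := ih (p ++ [t]) (fun u hu => h u (List.mem_cons_of_mem _ hu))
      simpa [pv_step2 ks p t hnd (h t List.mem_cons_self)] using this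

-- pass 3 step and fold
theorem pv_step3 (cnt : (String × String × String) → Int) (ks : List String)
    (ks2 : String → List String) (p : List (String × String × String))
    (t : String × String × String) (hnd : ks.Nodup) (hnd2 : ∀ w, (ks2 w).Nodup)
    (ht : t.1 ∈ ks) (ht2 : t.2.1 ∈ ks2 t.1) :
    (pvC3 cnt ks ks2 p).modify t.1 PySem.Dict.empty (fun i =>
        i.modify t.2.1 PySem.Dict.empty (fun j => j.insert t.2.2 (cnt t)))
      = pvC3 cnt ks ks2 (p ++ [t]) := by
  unfold pvC3
  rw [PySem.Dict.modify, pv_getD_mem _ _ _ _ hnd ht, pv_insert_mem _ _ _ _ ht]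
  congr 1
  apply List.map_congr_left
  intro w _
  by_cases hw : w = t.1
  · subst hw
    rw [if_pos rfl, PySem.Dict.modify, pv_getD_mem _ _ _ _ (hnd2 t.1) ht2,
      pv_insert_mem _ _ _ _ ht2, ← pvInner_append_self cnt p t]
    congr 2
    apply List.map_congr_left
    intro w2 _
    by_cases hw2 : w2 = t.2.1
    · simp [hw2]
    · simp [hw2, pvInner_append_ne cnt p t t.1 w2 (by simp [hw2])]
  · have : ∀ w2, pvInner cnt (p ++ [t]) w w2 = pvInner cnt p w w2 :=
      fun w2 => pvInner_append_ne cnt p t w w2 (by simp [hw])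
    simp [hw, this]

theorem pv_fold3 (cnt : (String × String × String) → Int) (ks : List String)
    (ks2 : String → List String) (rest p : List (String × String × String))
    (hnd : ks.Nodup) (hnd2 : ∀ w, (ks2 w).Nodup)
    (h : ∀ t ∈ rest, t.1 ∈ ks) (h2 : ∀ t ∈ rest, t.2.1 ∈ ks2 t.1) :
    rest.foldl (fun d t =>
        d.modify t.1 PySem.Dict.empty (fun i =>
          i.modify t.2.1 PySem.Dict.empty (fun j => j.insert t.2.2 (cnt t))))
      (pvC3 cnt ks ks2 p) = pvC3 cnt ks ks2 (p ++ rest) := by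
  induction rest generalizing p with
  | nil => simp
  | cons t rest ih =>
      have := ih (p ++ [t]) (fun u hu => h u (List.mem_cons_of_mem _ hu))
        (fun u hu => h2 u (List.mem_cons_of_mem _ hu))
      simpa [pv_step3 cnt ks ks2 p t hnd hnd2 (h t List.mem_cons_self)
        (h2 t List.mem_cons_self)] using this

-- B's single pass
theorem pv_stepB (cnt : (String × String × String) → Int)
    (p : List (String × String × String)) (t : String × String × String) :
    ((pvC3 cnt (pvW p) (pvW2 p) p).setdefault t.1 PySem.Dict.empty).modify t.1
        PySem.Dict.empty (fun i =>
          (i.setdefault t.2.1 PySem.Dict.empty).modify t.2.1 PySem.Dict.empty (fun j =>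
            j.insert t.2.2 (cnt t)))
      = pvC3 cnt (pvW (p ++ [t])) (pvW2 (p ++ [t])) (p ++ [t]) := by
  have hW : (PySem.Set.add (pvW p) t.1).Nodup := PySem.Set.nodup_add _ _ (pvW_nodup p)
  have hmem : t.1 ∈ PySem.Set.add (pvW p) t.1 := (PySem.Set.mem_add _ _ _).2 (Or.inr rfl)
  have hW2 : (PySem.Set.add (pvW2 p t.1) t.2.1).Nodup :=
    PySem.Set.nodup_add _ _ (pvW2_nodup p t.1)
  have hmem2 : t.2.1 ∈ PySem.Set.add (pvW2 p t.1) t.2.1 := (PySem.Set.mem_add _ _ _).2 (Or.inr rfl)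
  have hsd : (pvC3 cnt (pvW p) (pvW2 p) p).setdefault t.1 PySem.Dict.empty
      = pvC3 cnt (PySem.Set.add (pvW p) t.1) (pvW2 p) p := by
    unfold pvC3
    by_cases h1 : t.1 ∈ pvW p
    · rw [pv_setdefault_mem _ _ _ _ h1, PySem.Set.add_of_mem h1]
    · rw [pv_setdefault_not_mem _ _ _ _ h1, PySem.Set.add_of_not_mem h1]
      simp [pvW2_of_not_mem p t.1 h1, PySem.Dict.empty]
  rw [hsd]
  unfold pvC3
  rw [PySem.Dict.modify, pv_getD_mem _ _ _ _ hW hmem]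
  have hsd2 : (PySem.Dict.mk
        ((pvW2 p t.1).map (fun w2 => (w2, pvInner cnt p t.1 w2)))).setdefault t.2.1
        PySem.Dict.empty
      = PySem.Dict.mk
        ((PySem.Set.add (pvW2 p t.1) t.2.1).map (fun w2 => (w2, pvInner cnt p t.1 w2))) := by
    by_cases h2 : t.2.1 ∈ pvW2 p t.1
    · rw [pv_setdefault_mem _ _ _ _ h2, PySem.Set.add_of_mem h2]
    · rw [pv_setdefault_not_mem _ _ _ _ h2, PySem.Set.add_of_not_mem h2]
      simp [pvInner_of_not_mem cnt p t.1 t.2.1 h2, PySem.Dict.empty]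
  rw [hsd2, PySem.Dict.modify, pv_getD_mem _ _ _ _ hW2 hmem2, pv_insert_mem _ _ _ _ hmem2,
    pv_insert_mem _ _ _ _ hmem, ← pvInner_append_self cnt p t, pvW_append]
  congr 1
  apply List.map_congr_left
  intro w hw
  by_cases hwt : w = t.1
  · subst hwt
    rw [if_pos rfl, pvW2_append_self]
    congr 2
    apply List.map_congr_left
    intro w2 _
    by_cases hw2 : w2 = t.2.1
    · simp [hw2]
    · simp [hw2, pvInner_append_ne cnt p t t.1 w2 (by simp [hw2])]
  · have h2 := pvW2_append_ne p t w hwt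
    have h3 : ∀ w2, pvInner cnt (p ++ [t]) w w2 = pvInner cnt p w w2 :=
      fun w2 => pvInner_append_ne cnt p t w w2 (by simp [hwt])
    simp [hwt, h2, h3]

theorem pv_foldB (cnt : (String × String × String) → Int)
    (rest p : List (String × String × String)) :
    rest.foldl (fun d t =>
        (d.setdefault t.1 PySem.Dict.empty).modify t.1 PySem.Dict.empty (fun i =>
          (i.setdefault t.2.1 PySem.Dict.empty).modify t.2.1 PySem.Dict.empty (fun j =>
            j.insert t.2.2 (cnt t))))
      (pvC3 cnt (pvW p) (pvW2 p) p) = pvC3 cnt (pvW (p ++ rest)) (pvW2 (p ++ rest)) (p ++ rest) := by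
  induction rest generalizing p with
  | nil => simp
  | cons t rest ih => simpa [pv_stepB] using ih (p ++ [t])

-- ===== VERDICT (by name: the statement is the Claim_ definition above) =====
theorem dict3D_from_dict_spec : Claim_equal_dict3D_from_dict := by
  intro tc _
  unfold Spec_dict3D_from_dict dict3D_from_dict dict3D_from_dict_alt
  dsimp only
  refine congrArg pvFlatten ?_
  have a1 : (pvTrigramsSorted tc).foldl (fun d t => d.insert t.1 PySem.Dict.empty)
      (PySem.Dict.empty : PySem.Dict String (PySem.Dict String (PySem.Dict String Int)))
      = pvC1 (pvTrigramsSorted tc) := pv_fold1 (pvTrigramsSorted tc) []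
  have a2 : (pvTrigramsSorted tc).foldl (fun d t =>
        d.modify t.1 PySem.Dict.empty (fun i => i.insert t.2.1 PySem.Dict.empty))
      (pvC1 (pvTrigramsSorted tc))
      = pvC2 (pvW (pvTrigramsSorted tc)) (pvTrigramsSorted tc) :=
    pv_fold2 (pvW (pvTrigramsSorted tc)) (pvTrigramsSorted tc) [] (pvW_nodup _)
      (fun t ht => pv_mem_W _ t ht)
  have a3 : (pvTrigramsSorted tc).foldl (fun d t =>
        d.modify t.1 PySem.Dict.empty (fun i =>
          i.modify t.2.1 PySem.Dict.empty (fun j => j.insert t.2.2 (pvCount tc t))))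
      (pvC2 (pvW (pvTrigramsSorted tc)) (pvTrigramsSorted tc))
      = pvC3 (pvCount tc) (pvW (pvTrigramsSorted tc)) (pvW2 (pvTrigramsSorted tc))
          (pvTrigramsSorted tc) :=
    pv_fold3 (pvCount tc) _ _ (pvTrigramsSorted tc) [] (pvW_nodup _) (pvW2_nodup _)
      (fun t ht => pv_mem_W _ t ht) (fun t ht => pv_mem_W2 _ t ht)
  have b : (pvTrigramsSorted tc).foldl (fun d t =>
        (d.setdefault t.1 PySem.Dict.empty).modify t.1 PySem.Dict.empty (fun i =>
          (i.setdefault t.2.1 PySem.Dict.empty).modify t.2.1 PySem.Dict.empty (fun j =>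
            j.insert t.2.2 (pvCount tc t))))
      (PySem.Dict.empty : PySem.Dict String (PySem.Dict String (PySem.Dict String Int)))
      = pvC3 (pvCount tc) (pvW (pvTrigramsSorted tc)) (pvW2 (pvTrigramsSorted tc))
          (pvTrigramsSorted tc) := pv_foldB (pvCount tc) (pvTrigramsSorted tc) []
  rw [a1, a2, a3, b]
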